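-- pv_equiv track=rewrite | github.com/dariakryvosheieva/agent-psychometrics | experiment_b/compute_llm_judge_v5_single.py | format_trajectory_for_prompt
-- ===== SOURCE A (Python) =====
-- from typing import Dict, List, Optional
--
-- def format_trajectory_for_prompt(traj: Dict, max_chars: int = 40000) -> str:
--     """Format trajectory messages for prompt."""
--     messages = traj.get("messages", [])
--     if not messages:
--         return "(No messages in trajectory)"
--
--     lines = []
--     total_chars = 0
--
--     for i, msg in enumerate(messages):
--         role = msg.get("role", "unknown")
--         content = msg.get("content", "")
--
--         if len(content) > 3000:
--             content = content[:1500] + "\n...[truncated]...\n" + content[-1500:]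
--
--         line = f"[{role.upper()}]: {content}"
--
--         if total_chars + len(line) > max_chars:
--             lines.append(f"\n...[{len(messages) - i} more messages truncated]...")
--             break
--
--         lines.append(line)
--         total_chars += len(line)
--
--     return "\n\n".join(lines)
-- ===== SOURCE B (Python) =====
-- def format_trajectory_for_prompt(traj, max_chars=40000):
--     """Format trajectory messages for prompt (build-all-then-cut decomposition)."""
--     messages = traj.get("messages", [])
--     if not messages:
--         return "(No messages in trajectory)"
--
--     def fmt(msg):
--         content = msg.get("content", "")
--         if len(content) > 3000:
--             content = content[:1500] + "\n...[truncated]...\n" + content[-1500:]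
--         return f"[{msg.get('role', 'unknown').upper()}]: {content}"
--
--     lines = [fmt(m) for m in messages]
--     totals = []
--     t = 0
--     for line in lines:
--         t += len(line)
--         totals.append(t)
--     cut = next((i for i, t in enumerate(totals) if t > max_chars), None)
--     if cut is None:
--         return "\n\n".join(lines)
--     return "\n\n".join(lines[:cut] + [f"\n...[{len(messages) - cut} more messages truncated]..."])
-- ===== Notes on version B (the rewrite author's own statement) =====
-- stated objective: alternative
-- what changed: A interleaves formatting, the running total, the cut test and output accumulation in one loop with break; B first formats all messages into a list, separately computes the running character totals, finds the first index exceeding max_chars with next()/enumerate, and builds the output by slicing that list.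
import Mathlib
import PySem

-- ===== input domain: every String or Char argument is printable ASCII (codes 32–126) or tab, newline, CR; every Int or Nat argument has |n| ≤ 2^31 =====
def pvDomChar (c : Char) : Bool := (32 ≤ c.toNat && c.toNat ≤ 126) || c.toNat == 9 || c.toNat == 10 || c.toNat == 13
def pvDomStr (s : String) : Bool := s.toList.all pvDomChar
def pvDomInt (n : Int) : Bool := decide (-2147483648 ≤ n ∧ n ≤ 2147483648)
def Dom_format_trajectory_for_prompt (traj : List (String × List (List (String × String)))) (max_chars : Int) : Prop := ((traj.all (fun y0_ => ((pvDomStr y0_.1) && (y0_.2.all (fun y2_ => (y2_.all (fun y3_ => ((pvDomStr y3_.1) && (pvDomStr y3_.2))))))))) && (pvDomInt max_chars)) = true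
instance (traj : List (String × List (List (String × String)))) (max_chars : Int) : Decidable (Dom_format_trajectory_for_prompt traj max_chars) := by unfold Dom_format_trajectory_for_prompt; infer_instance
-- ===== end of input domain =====

-- B differs by decomposition: it first formats ALL messages, then computes running character
-- totals and cuts at the first index whose total exceeds max_chars (objective: alternative).

-- ===== PORT A =====
-- A's single pass: enumerate with running total, append-or-break.
def pvALoop (n : Int) (max_chars : Int) :
    List (List (String × String)) → Int → Int → List String → List String
  | [], _, _, lines => lines
  | msg :: rest, i, total_chars, lines =>
      let role := (PySem.Dict.mk msg).getD "role" "unknown"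
      let content := (PySem.Dict.mk msg).getD "content" ""
      let content :=
        if PySem.Str.len content > 3000 then
          PySem.Str.slice content none (some 1500) ++ "\n...[truncated]...\n" ++
            PySem.Str.slice content (some (-1500)) none
        else content
      let line := "[" ++ PySem.Str.upper role ++ "]: " ++ content
      if total_chars + PySem.Str.len line > max_chars then
        lines ++ ["\n...[" ++ PySem.Int.toStr (n - i) ++ " more messages truncated]..."]
      else
        pvALoop n max_chars rest (i + 1) (total_chars + PySem.Str.len line) (lines ++ [line])

def format_trajectory_for_prompt (traj : List (String × List (List (String × String)))) (max_chars : Int) : String :=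
  let messages := (PySem.Dict.mk traj).getD "messages" []
  if messages = [] then "(No messages in trajectory)"
  else PySem.Str.join "\n\n" (pvALoop (messages.length : Int) max_chars messages 0 0 [])

-- ===== PORT B =====
def pvFmt (msg : List (String × String)) : String :=
  let content := (PySem.Dict.mk msg).getD "content" ""
  let content :=
    if PySem.Str.len content > 3000 then
      PySem.Str.slice content none (some 1500) ++ "\n...[truncated]...\n" ++
        PySem.Str.slice content (some (-1500)) none
    else content
  "[" ++ PySem.Str.upper ((PySem.Dict.mk msg).getD "role" "unknown") ++ "]: " ++ content

-- the `t += len(line); totals.append(t)` pass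
def pvTotals : List String → Int → List Int
  | [], _ => []
  | line :: rest, t => (t + PySem.Str.len line) :: pvTotals rest (t + PySem.Str.len line)

def format_trajectory_for_prompt_alt (traj : List (String × List (List (String × String)))) (max_chars : Int) : String :=
  let messages := (PySem.Dict.mk traj).getD "messages" []
  if messages = [] then "(No messages in trajectory)"
  else
    let lines := messages.map pvFmt
    match (pvTotals lines 0).findIdx? (fun t => max_chars < t) with
    | none => PySem.Str.join "\n\n" lines
    | some cut =>
        PySem.Str.join "\n\n" (lines.take cut ++
          ["\n...[" ++ PySem.Int.toStr ((messages.length : Int) - cut) ++ " more messages truncated]..."])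

-- ===== PRECONDITION & SPEC =====
def Spec_format_trajectory_for_prompt (traj : List (String × List (List (String × String)))) (max_chars : Int) (out : String) : Prop := out = format_trajectory_for_prompt_alt traj max_chars
instance (traj : List (String × List (List (String × String)))) (max_chars : Int) (out : String) : Decidable (Spec_format_trajectory_for_prompt traj max_chars out) := by unfold Spec_format_trajectory_for_prompt; infer_instance

-- ===== CLAIM (what is proved, stated in full; the proofs are below) =====
def Claim_equal_format_trajectory_for_prompt : Prop := ∀ (traj : List (String × List (List (String × String)))) (max_chars : Int), Dom_format_trajectory_for_prompt traj max_chars → Spec_format_trajectory_for_prompt traj max_chars (format_trajectory_for_prompt traj max_chars)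

-- ===== LEMMAS AND PROOFS =====
theorem pvALoop_eq (max_chars n : Int) (msgs : List (List (String × String)))
    (i total : Int) (pref : List String) :
    pvALoop n max_chars msgs i total pref =
      match (pvTotals (msgs.map pvFmt) total).findIdx? (fun t => max_chars < t) with
      | none => pref ++ msgs.map pvFmt
      | some k => pref ++ (msgs.map pvFmt).take k ++
          ["\n...[" ++ PySem.Int.toStr (n - (i + k)) ++ " more messages truncated]..."] := by
  induction msgs generalizing i total pref with
  | nil => simp [pvALoop, pvTotals]
  | cons m rest ih =>
    simp only [pvALoop, List.map_cons, pvTotals, List.findIdx?_cons]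
    have hline : (let role := (PySem.Dict.mk m).getD "role" "unknown"
        let content := (PySem.Dict.mk m).getD "content" ""
        let content :=
          if PySem.Str.len content > 3000 then
            PySem.Str.slice content none (some 1500) ++ "\n...[truncated]...\n" ++
              PySem.Str.slice content (some (-1500)) none
          else content
        ("[" ++ PySem.Str.upper role ++ "]: " ++ content)) = pvFmt m := rfl
    rw [hline]
    by_cases h : max_chars < total + PySem.Str.len (pvFmt m)
    · simp only [h, decide_true]
      simp
    · rw [if_neg (show ¬ total + PySem.Str.len (pvFmt m) > max_chars from h)]
      simp only [decide_eq_true_eq, h, if_neg, not_false_iff]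
      rw [ih (i + 1) (total + PySem.Str.len (pvFmt m)) (pref ++ [pvFmt m])]
      cases hfi : (pvTotals (rest.map pvFmt) (total + PySem.Str.len (pvFmt m))).findIdx?
          (fun t => max_chars < t) with
      | none => simp
      | some k =>
        simp only [Option.map_some]
        have : n - (i + 1 + (k : Int)) = n - (i + ((k + 1 : Nat) : Int)) := by push_cast; ring
        simp [this]

theorem format_trajectory_for_prompt_spec : Claim_equal_format_trajectory_for_prompt := by
  intro traj max_chars _
  unfold Spec_format_trajectory_for_prompt format_trajectory_for_prompt format_trajectory_for_prompt_alt
  set messages := (PySem.Dict.mk traj).getD "messages" [] with hm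
  by_cases h : messages = []
  · simp [h]
  · simp only [if_neg h]
    rw [pvALoop_eq]
    cases hfi : (pvTotals (messages.map pvFmt) 0).findIdx? (fun t => max_chars < t) with
    | none => simp
    | some k => simp
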